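-- pv_equiv track=rewrite | github.com/linzeyang/leetcode-solutions | medium/2211.py | countCollisions
-- ===== SOURCE A (Python) =====
-- from typing import Literal
--
-- def countCollisions(directions: str) -> int:
--     """Simulate the collisions using a stack."""
--
--     if len(directions) < 2:
--         return 0
--
--     out: int = 0
--     stack: list[Literal["R", "S"]] = []
--
--     for direction in directions:
--         match direction:
--             case "L":
--                 if not stack:
--                     continue
--                 if stack[-1] == "S":
--                     out += 1
--                 else:
--                     out += len(stack) + 1
--                     stack.clear()
--                     stack.append("S")
--             case "R":
--                 if stack and stack[-1] == "S":
--                     stack.clear()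
--                 stack.append("R")
--             case "S":
--                 if stack and stack[-1] == "S":
--                     continue
--
--                 out += len(stack)
--                 stack.clear()
--                 stack.append("S")
--
--     return out
-- ===== SOURCE B (Python) =====
-- def countCollisions(directions: str) -> int:
--     """Only the three direction letters denote cars (anything else is not a car
--     and is discarded, as the simulation's match statement does).  Cars that drive
--     off the left or right edge never collide; every remaining car that is not
--     already stopped collides exactly once.  A filter, two edge trims and a
--     count -- no stack or per-character state machine."""
--     s = "".join(c for c in directions if c in "LRS")
--     s = s.lstrip("L").rstrip("R")
--     return sum(c != "S" for c in s)
-- ===== Notes on version B (the rewrite author's own statement) =====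
-- stated objective: simpler
-- what changed: Replaces the stack simulation with a filter to the direction alphabet, two edge trims (lstrip/rstrip) and a count of the remaining non-stationary cars; no stack or per-character branching, and the trims/joins run in C-level string primitives instead of a Python-level branch per character.
import Mathlib
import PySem

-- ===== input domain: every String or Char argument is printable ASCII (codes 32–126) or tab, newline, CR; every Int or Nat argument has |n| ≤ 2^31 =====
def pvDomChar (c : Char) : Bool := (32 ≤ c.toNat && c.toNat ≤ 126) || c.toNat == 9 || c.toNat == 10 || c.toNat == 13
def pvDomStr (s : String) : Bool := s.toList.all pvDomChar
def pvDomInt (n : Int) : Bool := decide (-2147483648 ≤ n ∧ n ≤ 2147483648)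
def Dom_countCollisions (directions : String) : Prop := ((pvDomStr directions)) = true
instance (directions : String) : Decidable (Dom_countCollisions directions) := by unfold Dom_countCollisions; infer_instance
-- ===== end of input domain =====

-- B replaces A's stack simulation by a filter to the direction alphabet, two edge
-- trims and a count of the remaining non-'S' cars (objective: simpler).

-- ===== PORT A =====
-- one iteration of A's `for direction in directions` loop, branch for branch
def countCollisionsStep (st : Int × List Char) (c : Char) : Int × List Char :=
  let out := st.1
  let stack := st.2
  if c = 'L' then
    if stack = [] then (out, stack)                                   -- continue
    else if PySem.List.pyGet? stack (-1) = some 'S' then (out + 1, stack)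
    else (out + (stack.length : Int) + 1, ['S'])                      -- clear; append('S')
  else if c = 'R' then
    if stack ≠ [] ∧ PySem.List.pyGet? stack (-1) = some 'S' then (out, ['R'])  -- clear; append('R')
    else (out, stack ++ ['R'])                                        -- append('R')
  else if c = 'S' then
    if stack ≠ [] ∧ PySem.List.pyGet? stack (-1) = some 'S' then (out, stack)  -- continue
    else (out + (stack.length : Int), ['S'])                          -- clear; append('S')
  else (out, stack)                                                   -- match: no case matches

def countCollisions (directions : String) : Int :=
  if PySem.Str.len directions < 2 then 0
  else (directions.toList.foldl countCollisionsStep (0, [])).1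

-- ===== PORT B =====
def countCollisions_alt (directions : String) : Int :=
  -- "".join(c for c in directions if c in "LRS"): for a single char, `c in "LRS"` is membership
  let cars : List Char := directions.toList.filter (fun c => c == 'L' || c == 'R' || c == 'S')
  -- lstrip("L") then rstrip("R"): exactly dropping the leading 'L's and the trailing 'R's
  let s : List Char := ((cars.dropWhile (· == 'L')).reverse.dropWhile (· == 'R')).reverse
  -- sum(c != "S" for c in s)
  s.foldl (fun acc c => if c != 'S' then acc + 1 else acc) 0

-- ===== PRECONDITION & SPEC =====
def Spec_countCollisions (directions : String) (out : Int) : Prop := out = countCollisions_alt directions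
instance (directions : String) (out : Int) : Decidable (Spec_countCollisions directions out) := by
  unfold Spec_countCollisions; infer_instance

-- ===== CLAIM (what is proved, stated in full; the proofs are below) =====
def Claim_equal_countCollisions : Prop := ∀ (directions : String), Dom_countCollisions directions → Spec_countCollisions directions (countCollisions directions)

-- ===== LEMMAS AND PROOFS =====

-- the characters that name a car
def pvF (l : List Char) : List Char := l.filter (fun c => c == 'L' || c == 'R' || c == 'S')

-- recursive characterization of "drop the trailing 'R's"
def pvDropTrailR : List Char → List Char
  | [] => []
  | c :: t =>
    match pvDropTrailR t with
    | [] => if c = 'R' then [] else [c]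
    | x :: xs => c :: x :: xs

-- the non-'S' count, as an Int
def pvCNS (l : List Char) : Int := (l.countP (· != 'S') : Int)

lemma pvDropTrailR_eq (l : List Char) :
    pvDropTrailR l = (l.reverse.dropWhile (· == 'R')).reverse := by
  induction l with
  | nil => rfl
  | cons c t ih =>
    simp only [pvDropTrailR, List.reverse_cons, List.dropWhile_append]
    cases h : pvDropTrailR t with
    | nil =>
      have h0 : t.reverse.dropWhile (· == 'R') = [] := by
        rw [h] at ih
        have := congrArg List.reverse ih
        simpa using this.symm
      by_cases hc : c = 'R'
      · simp [h0, hc, List.dropWhile]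
      · have hb : (c == 'R') = false := by simp [hc]
        simp [h0, hc, hb, List.dropWhile]
    | cons x xs =>
      have hne : t.reverse.dropWhile (· == 'R') ≠ [] := by
        intro hh
        rw [hh] at ih; simp at ih; rw [ih] at h; simp at h
      simp [List.isEmpty_iff, hne]
      rw [ih] at h
      have := congrArg List.reverse h
      simp at this
      simp [this]

lemma pvCNS_cons (c : Char) (t : List Char) :
    pvCNS (c :: t) = (if c != 'S' then 1 else 0) + pvCNS t := by
  simp [pvCNS, List.countP_cons]
  by_cases h : c = 'S' <;> simp [h]
  ring

lemma pvDropTrailR_cons_ne_nil (c : Char) (t : List Char) (hc : c ≠ 'R') :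
    pvDropTrailR (c :: t) ≠ [] := by
  simp only [pvDropTrailR]
  cases pvDropTrailR t <;> simp [hc]

lemma pvDropTrailR_cons_R (t : List Char) :
    pvDropTrailR ('R' :: t) = if pvDropTrailR t = [] then [] else 'R' :: pvDropTrailR t := by
  simp only [pvDropTrailR]
  cases pvDropTrailR t <;> simp

lemma pvCNS_dropTrailR_cons_ne (c : Char) (t : List Char) (hc : c ≠ 'R') :
    pvCNS (pvDropTrailR (c :: t)) = (if c != 'S' then 1 else 0) + pvCNS (pvDropTrailR t) := by
  simp only [pvDropTrailR]
  cases h : pvDropTrailR t with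
  | nil => simp [hc, pvCNS]
  | cons x xs => rw [pvCNS_cons]

lemma pvGet_last_replicate (k : Nat) (hk : 1 ≤ k) :
    PySem.List.pyGet? (List.replicate k 'R') (-1) = some 'R' := by
  simp [PySem.List.pyGet?, PySem.List.pyIdx?, hk]
  rw [List.getElem?_eq_getElem (by simp; omega)]
  simp

-- the behaviour of A's loop from each reachable stack shape
lemma pvRunA (l : List Char) :
    (∀ out : Int, (l.foldl countCollisionsStep (out, ['S'])).1 = out + pvCNS (pvDropTrailR (pvF l)))
  ∧ (∀ (out : Int) (k : Nat), 1 ≤ k →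
      (l.foldl countCollisionsStep (out, List.replicate k 'R')).1 =
        out + (if pvDropTrailR (pvF l) = [] then 0 else (k : Int) + pvCNS (pvDropTrailR (pvF l))))
  ∧ (∀ out : Int, (l.foldl countCollisionsStep (out, [])).1 =
        out + pvCNS (pvDropTrailR ((pvF l).dropWhile (· == 'L')))) := by
  induction l with
  | nil =>
    exact ⟨fun out => by simp [pvCNS, pvF], fun out k hk => by simp [pvDropTrailR, pvF],
           fun out => by simp [pvCNS, pvDropTrailR, pvF]⟩
  | cons c t ih =>
    obtain ⟨ihS, ihR, ihE⟩ := ih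
    by_cases hL : c = 'L'
    case pos =>
      subst hL
      have hF : pvF ('L' :: t) = 'L' :: pvF t := by simp [pvF]
      refine ⟨?_, ?_, ?_⟩
      · -- from ['S'], 'L' : out += 1
        intro out
        rw [List.foldl_cons]
        have hstep : countCollisionsStep (out, ['S']) 'L' = (out + 1, ['S']) := by
          simp [countCollisionsStep, PySem.List.pyGet?, PySem.List.pyIdx?]
        rw [hstep, ihS, hF, pvCNS_dropTrailR_cons_ne _ _ (by decide)]
        simp only [show ('L' != 'S') = true by decide, if_true]
        ring
      · -- from R-stack, 'L' : out += len(stack)+1; stack := ['S']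
        intro out k hk
        have hget := pvGet_last_replicate k hk
        have hnil : List.replicate k 'R' ≠ [] := by
          intro hh
          have := congrArg List.length hh
          simp at this
          omega
        rw [List.foldl_cons]
        have hstep : countCollisionsStep (out, List.replicate k 'R') 'L' =
            (out + (k : Int) + 1, ['S']) := by
          simp [countCollisionsStep, hnil, hget]
        rw [hstep, ihS, hF,
            if_neg (pvDropTrailR_cons_ne_nil 'L' (pvF t) (by decide)),
            pvCNS_dropTrailR_cons_ne _ _ (by decide)]
        simp only [show ('L' != 'S') = true by decide, if_true]
        ring
      · -- from [], 'L' : continue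
        intro out
        rw [List.foldl_cons]
        have hstep : countCollisionsStep (out, []) 'L' = (out, []) := by
          simp [countCollisionsStep]
        rw [hstep, ihE, hF]
        simp [List.dropWhile]
    case neg =>
    by_cases hR : c = 'R'
    case pos =>
      subst hR
      have hF : pvF ('R' :: t) = 'R' :: pvF t := by simp [pvF]
      refine ⟨?_, ?_, ?_⟩
      · -- from ['S'], 'R' : clear; append R
        intro out
        rw [List.foldl_cons]
        have hstep : countCollisionsStep (out, ['S']) 'R' = (out, ['R']) := by
          simp [countCollisionsStep, PySem.List.pyGet?, PySem.List.pyIdx?]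
        rw [hstep]
        have h1 := ihR out 1 (by omega)
        simp only [List.replicate_one] at h1
        rw [h1, hF, pvDropTrailR_cons_R]
        by_cases hdt : pvDropTrailR (pvF t) = []
        · simp [hdt, pvCNS]
        · simp [hdt, pvCNS_cons]
      · -- from R-stack, 'R' : append R
        intro out k hk
        have hget := pvGet_last_replicate k hk
        have hnil : List.replicate k 'R' ≠ [] := by
          intro hh
          have := congrArg List.length hh
          simp at this
          omega
        rw [List.foldl_cons]
        have hstep : countCollisionsStep (out, List.replicate k 'R') 'R' =
            (out, List.replicate (k + 1) 'R') := by
          simp [countCollisionsStep, hnil, hget, List.replicate_succ']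
        rw [hstep, ihR out (k + 1) (by omega), hF, pvDropTrailR_cons_R]
        by_cases hdt : pvDropTrailR (pvF t) = []
        · simp [hdt]
        · simp only [hdt, if_false]
          have hcons : ¬ ('R' :: pvDropTrailR (pvF t) = ([] : List Char)) := by simp
          rw [if_neg hcons, pvCNS_cons]
          simp only [show ('R' != 'S') = true by decide, if_true]
          push_cast
          ring
      · -- from [], 'R' : append R
        intro out
        rw [List.foldl_cons]
        have hstep : countCollisionsStep (out, []) 'R' = (out, ['R']) := by
          simp [countCollisionsStep]
        rw [hstep]
        have h1 := ihR out 1 (by omega)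
        simp only [List.replicate_one] at h1
        rw [h1, hF]
        have hd : ('R' :: pvF t).dropWhile (· == 'L') = 'R' :: pvF t := by
          simp [List.dropWhile]
        rw [hd, pvDropTrailR_cons_R]
        by_cases hdt : pvDropTrailR (pvF t) = []
        · simp [hdt, pvCNS]
        · simp [hdt, pvCNS_cons]
    case neg =>
    by_cases hS : c = 'S'
    case pos =>
      subst hS
      have hF : pvF ('S' :: t) = 'S' :: pvF t := by simp [pvF]
      refine ⟨?_, ?_, ?_⟩
      · -- from ['S'], 'S' : continue
        intro out
        rw [List.foldl_cons]
        have hstep : countCollisionsStep (out, ['S']) 'S' = (out, ['S']) := by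
          simp [countCollisionsStep, PySem.List.pyGet?, PySem.List.pyIdx?]
        rw [hstep, ihS, hF, pvCNS_dropTrailR_cons_ne _ _ (by decide)]
        simp
      · -- from R-stack, 'S' : out += len(stack); stack := ['S']
        intro out k hk
        have hget := pvGet_last_replicate k hk
        have hnil : List.replicate k 'R' ≠ [] := by
          intro hh
          have := congrArg List.length hh
          simp at this
          omega
        rw [List.foldl_cons]
        have hstep : countCollisionsStep (out, List.replicate k 'R') 'S' =
            (out + (k : Int), ['S']) := by
          simp [countCollisionsStep, hnil, hget]
        rw [hstep, ihS, hF,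
            if_neg (pvDropTrailR_cons_ne_nil 'S' (pvF t) (by decide)),
            pvCNS_dropTrailR_cons_ne _ _ (by decide)]
        simp
        ring
      · -- from [], 'S' : out += 0; stack := ['S']
        intro out
        rw [List.foldl_cons]
        have hstep : countCollisionsStep (out, []) 'S' = (out, ['S']) := by
          simp [countCollisionsStep]
        rw [hstep, ihS, hF]
        have hd : ('S' :: pvF t).dropWhile (· == 'L') = 'S' :: pvF t := by
          simp [List.dropWhile]
        rw [hd, pvCNS_dropTrailR_cons_ne _ _ (by decide)]
        simp
    case neg =>
      -- c is not a direction character: A's match skips it, B's filter drops it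
      have hF : pvF (c :: t) = pvF t := by simp [pvF, hL, hR, hS]
      have hid : ∀ st : Int × List Char, countCollisionsStep st c = st := by
        intro st
        simp [countCollisionsStep, hL, hR, hS]
      refine ⟨fun out => ?_, fun out k hk => ?_, fun out => ?_⟩
      · rw [List.foldl_cons, hid, ihS, hF]
      · rw [List.foldl_cons, hid, ihR out k hk, hF]
      · rw [List.foldl_cons, hid, ihE, hF]

-- B's fold is the non-'S' count of the trimmed, filtered list
lemma pvAltEq (directions : String) :
    countCollisions_alt directions =
      pvCNS (pvDropTrailR ((pvF directions.toList).dropWhile (· == 'L'))) := by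
  unfold countCollisions_alt
  rw [PySem.List.foldl_if_add_one (· != 'S')]
  rw [pvDropTrailR_eq, pvCNS, pvF]
  simp

-- ===== VERDICT (by name: the statement is the Claim_ definition above) =====
theorem countCollisions_spec : Claim_equal_countCollisions := by
  intro directions _
  unfold Spec_countCollisions countCollisions
  rw [pvAltEq]
  by_cases hlen : PySem.Str.len directions < 2
  · simp only [hlen, if_true]
    have hlen' : directions.toList.length < 2 := by
      have := PySem.Str.len_eq directions
      omega
    cases hl : directions.toList with
    | nil => simp [pvF, pvDropTrailR, pvCNS]
    | cons c t =>
      cases t with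
      | nil =>
        by_cases hL : c = 'L'
        · simp [pvF, hL, pvDropTrailR, pvCNS, List.dropWhile]
        · by_cases hR : c = 'R'
          · simp [pvF, hR, pvDropTrailR, pvCNS]
          · by_cases hS : c = 'S'
            · simp [pvF, hS, pvDropTrailR, pvCNS]
            · simp [pvF, hL, hR, hS, pvDropTrailR, pvCNS]
      | cons d u => rw [hl] at hlen'; simp at hlen'
  · simp only [hlen, if_false]
    rw [(pvRunA directions.toList).2.2 0]
    ring
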